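-- pv_equiv track=rewrite | github.com/Nico-VR/Pollen-Prediction-TFG | src/ppf/test_all_models.py | model_to_initials
-- ===== SOURCE A (Python) =====
-- def model_to_initials(model_name: str, uses_covariates: bool = False):
--     """Genera iniciales del modelo, añadiendo '-CV' si usa covariables."""
--     if 'train' not in model_name:
--         parts = model_name.split('.')[1:]
--     else:
--         parts = model_name.split('.')
--
--     initials = ""
--     if parts:
--         if any("train" in p for p in parts):
--             initials += parts[0][:2].upper()
--             initials += ''.join(part[0].upper() for part in parts[1:] if part)
--         else:
--             initials = ''.join(part[0].upper() for part in parts if part)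
--
--     if uses_covariates:
--         initials += "-CV"
--
--     return initials
-- ===== SOURCE B (Python) =====
-- def model_to_initials(model_name: str, uses_covariates: bool = False):
--     """Genera iniciales del modelo, añadiendo '-CV' si usa covariables."""
--     # Single character-level scan; no split() and no list of parts is ever built.
--     # State: current part index and position within the part.  'train' contains
--     # no '.', so 'train' in model_name  <=>  'train' in some split part, which is
--     # what governs which characters A keeps.
--     has_train = 'train' in model_name
--     out = []
--     part = 0
--     pos = 0
--     for ch in model_name:
--         if ch == '.':
--             part += 1
--             pos = 0
--         else:
--             if has_train:
--                 take = (part == 0 and pos < 2) or (part > 0 and pos == 0)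
--             else:
--                 take = part > 0 and pos == 0
--             if take:
--                 out.append(ch.upper())
--             pos += 1
--     initials = ''.join(out)
--     if uses_covariates:
--         initials += '-CV'
--     return initials
-- ===== Notes on version B (the rewrite author's own statement) =====
-- stated objective: alternative
-- what changed: B never calls split() or builds a parts list: it does one character-level scan with a (part index, position-in-part) state machine, selecting characters directly (part 0 positions <2 when 'train' occurs, otherwise first character of parts after the first), where A materialises the split, re-scans all parts with any(), and builds initials from the parts.
import Mathlib
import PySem

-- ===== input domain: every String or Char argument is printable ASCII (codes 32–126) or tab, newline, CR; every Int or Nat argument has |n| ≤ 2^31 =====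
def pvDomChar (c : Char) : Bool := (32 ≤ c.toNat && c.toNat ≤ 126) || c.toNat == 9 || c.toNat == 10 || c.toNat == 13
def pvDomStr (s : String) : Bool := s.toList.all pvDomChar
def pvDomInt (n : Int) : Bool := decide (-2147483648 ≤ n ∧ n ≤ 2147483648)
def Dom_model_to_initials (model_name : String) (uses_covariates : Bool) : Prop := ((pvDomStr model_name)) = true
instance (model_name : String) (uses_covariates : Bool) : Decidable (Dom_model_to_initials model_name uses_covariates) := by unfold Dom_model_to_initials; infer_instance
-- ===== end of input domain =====

-- B replaces A's split-into-parts + any() re-scan + join-of-initials pipeline by one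
-- character-level scan with a (part index, position-in-part) state machine — an
-- alternative algorithm of the same cost, no speed claim.

-- ===== PORT A =====
-- transliteration of ''.join(part[0].upper() for part in ps if part)
def pvJoinInitials (ps : List (List Char)) : List Char :=
  PySem.Chars.join [] ((ps.filter (fun p => !p.isEmpty)).map
    (fun p => match p with
      | [] => []
      | c :: _ => PySem.Chars.upper [c]))

-- `'train' not in model_name` ported as `!isIn`; parts[0] reached only under the nonempty guard
def pvAcore (s : List Char) : List Char :=
  let parts :=
    if !PySem.Chars.isIn "train".toList s then
      PySem.List.slice (PySem.Chars.splitOn s ['.']) (some 1) none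
    else
      PySem.Chars.splitOn s ['.']
  if !parts.isEmpty then
    if parts.any (fun p => PySem.Chars.isIn "train".toList p) then
      (match parts with
        | [] => []
        | p0 :: _ => PySem.Chars.upper (PySem.List.slice p0 none (some 2)))
      ++ pvJoinInitials (PySem.List.slice parts (some 1) none)
    else
      pvJoinInitials parts
  else []

def model_to_initials (model_name : String) (uses_covariates : Bool) : String :=
  let initials := pvAcore model_name.toList
  String.ofList (if uses_covariates then initials ++ "-CV".toList else initials)

-- ===== PORT B =====
-- one step of B's for-loop; state = (out, part, pos)
def pvScanStep (has_train : Bool) (st : List Char × Nat × Nat) (ch : Char) : List Char × Nat × Nat :=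
  match st with
  | (out, part, pos) =>
    if ch = '.' then (out, part + 1, 0)
    else
      let take := if has_train then (decide (part = 0) && decide (pos < 2)) || (decide (0 < part) && decide (pos = 0))
                  else decide (0 < part) && decide (pos = 0)
      (if take then out ++ PySem.Chars.upper [ch] else out, part, pos + 1)

def model_to_initials_alt (model_name : String) (uses_covariates : Bool) : String :=
  let has_train := PySem.Chars.isIn "train".toList model_name.toList
  let st := model_name.toList.foldl (pvScanStep has_train) ([], 0, 0)
  let initials := st.1
  String.ofList (if uses_covariates then initials ++ "-CV".toList else initials)

-- ===== PRECONDITION & SPEC =====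
def Spec_model_to_initials (model_name : String) (uses_covariates : Bool) (out : String) : Prop := out = model_to_initials_alt model_name uses_covariates
instance (model_name : String) (uses_covariates : Bool) (out : String) : Decidable (Spec_model_to_initials model_name uses_covariates out) := by unfold Spec_model_to_initials; infer_instance

-- ===== CLAIM (what is proved, stated in full; the proofs are below) =====
def Claim_equal_model_to_initials : Prop := ∀ (model_name : String) (uses_covariates : Bool), Dom_model_to_initials model_name uses_covariates → Spec_model_to_initials model_name uses_covariates (model_to_initials model_name uses_covariates)

-- ===== LEMMAS AND PROOFS =====

-- split-based intermediate form of the result (proof-only helper, not a port)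
def pvSpecCore (s : List Char) : List Char :=
  if PySem.Chars.isIn "train".toList s then
    match PySem.Chars.splitOn s ['.'] with
    | [] => []
    | first :: rest =>
        PySem.Chars.upper (PySem.List.slice first none (some 2)) ++ pvJoinInitials rest
  else
    pvJoinInitials (PySem.List.slice (PySem.Chars.splitOn s ['.']) (some 1) none)

-- fuel-free reformulation of PySem.Chars.splitOn.go with sep = ['.']
def pvF : List Char → List Char → List (List Char)
  | [], cur => [cur.reverse]
  | c :: rest, cur => if c = '.' then cur.reverse :: pvF rest [] else pvF rest (c :: cur)

theorem pvGo_eq (l : List Char) : ∀ (fuel : Nat) (cur : List Char) (acc : List (List Char)),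
    l.length < fuel →
    PySem.Chars.splitOn.go ['.'] fuel l cur acc = acc.reverse ++ pvF l cur := by
  induction l with
  | nil =>
    intro fuel cur acc h
    match fuel, h with
    | fuel+1, _ => simp [PySem.Chars.splitOn.go, pvF]
  | cons c rest ih =>
    intro fuel cur acc h
    simp only [List.length_cons] at h
    match fuel, h with
    | fuel+1, h =>
      rw [PySem.Chars.splitOn.go]
      simp only [List.isPrefixOf, Bool.and_true]
      by_cases hc : c = '.'
      · subst hc
        simp only [beq_self_eq_true, if_pos]
        have : List.drop (['.'] : List Char).length ('.' :: rest) = rest := by simp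
        rw [this, ih fuel [] (cur.reverse :: acc) (by omega)]
        simp [pvF]
      · rw [if_neg (by simp [Ne.symm hc])]
        rw [ih fuel (c :: cur) acc (by omega)]
        simp [pvF, hc]

theorem pvSplitOn_eq (s : List Char) : PySem.Chars.splitOn s ['.'] = pvF s [] := by
  rw [PySem.Chars.splitOn, pvGo_eq s (s.length + 1) [] [] (by omega)]
  simp

theorem pvF_ne_nil (l : List Char) : ∀ cur, pvF l cur ≠ [] := by
  induction l with
  | nil => intro cur; simp [pvF]
  | cons c rest ih =>
    intro cur
    by_cases hc : c = '.' <;> simp [pvF, hc, ih]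

theorem pvJoin_pvF (l : List Char) : ∀ cur, PySem.Chars.join ['.'] (pvF l cur) = cur.reverse ++ l := by
  induction l with
  | nil => intro cur; simp [pvF, PySem.Chars.join_singleton]
  | cons c rest ih =>
    intro cur
    by_cases hc : c = '.'
    · subst hc
      obtain ⟨q, qs, hF⟩ : ∃ q qs, pvF rest [] = q :: qs := by
        cases h : pvF rest [] with
        | nil => exact absurd h (pvF_ne_nil rest [])
        | cons q qs => exact ⟨q, qs, rfl⟩
      rw [pvF, if_pos rfl, hF, PySem.Chars.join_cons_cons]
      have := ih []
      rw [hF] at this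
      simp only [List.reverse_nil, List.nil_append] at this
      rw [this]
      simp
    · rw [pvF]
      simp only [if_neg hc]
      rw [ih (c :: cur)]
      simp

theorem pvInfix_of_mem_join (c : Char) (parts : List (List Char)) (p : List Char)
    (hp : p ∈ parts) : p <:+: PySem.Chars.join [c] parts := by
  induction parts with
  | nil => cases hp
  | cons a t ih =>
    rcases List.mem_cons.mp hp with rfl | hp
    · match t with
      | [] => simp [PySem.Chars.join_singleton]
      | b :: t' =>
        rw [PySem.Chars.join_cons_cons]
        rw [List.append_assoc]
        exact ((List.prefix_append p _).isInfix)
    · match t with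
      | [] => cases hp
      | b :: t' =>
        rw [PySem.Chars.join_cons_cons]
        exact ((ih hp).trans (List.suffix_append _ _).isInfix)

theorem pvInfix_append_cons (sub xs ys : List Char) (c : Char)
    (h : sub <:+: xs ++ c :: ys) (hc : c ∉ sub) : sub <:+: xs ∨ sub <:+: ys := by
  obtain ⟨s, t, hst⟩ := h
  by_cases h1 : s.length + sub.length ≤ xs.length
  · left
    have hpre : (s ++ sub) <+: xs := by
      have : (s ++ sub) <+: xs ++ c :: ys := ⟨t, by simpa [List.append_assoc] using hst⟩
      rw [List.prefix_iff_eq_take] at this ⊢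
      rw [this, List.take_append_of_le_length (by simpa using h1)]
      simp [List.length_take]
    exact ((List.suffix_append s sub).isInfix).trans hpre.isInfix
  · by_cases h2 : xs.length + 1 ≤ s.length
    · right
      obtain ⟨k, hk⟩ : ∃ k, s.length = (xs ++ [c]).length + k :=
        ⟨s.length - (xs.length + 1), by simp; omega⟩
      have hdrop : (xs ++ c :: ys).drop s.length = ys.drop k := by
        have : xs ++ c :: ys = (xs ++ [c]) ++ ys := by simp
        rw [this, hk, List.drop_append]
        simp
      have : sub ++ t = ys.drop k := by
        rw [← hdrop, ← hst, List.append_assoc, List.drop_left]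
      exact ((List.prefix_append sub t).isInfix.trans (by rw [this]; exact (List.drop_suffix k ys).isInfix))
    · exfalso
      simp only [not_le] at h1 h2
      have hlen : xs.length < (xs ++ c :: ys).length := by simp
      have hgl : (xs ++ c :: ys)[xs.length] = c := by
        rw [List.getElem_append_right (le_refl xs.length)]
        simp
      have hs : s.length ≤ xs.length := by omega
      have hlt : xs.length - s.length < sub.length := by omega
      have hgr : (s ++ (sub ++ t))[xs.length]'(by rw [List.append_assoc] at hst; rw [hst]; exact hlen) = sub[xs.length - s.length] := by
        rw [List.getElem_append_right hs]
        rw [List.getElem_append_left hlt]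
      have : sub[xs.length - s.length] = c := by
        rw [← hgr]
        have hst' : s ++ (sub ++ t) = xs ++ c :: ys := by rw [← List.append_assoc]; exact hst
        simp only [hst']
        exact hgl
      exact hc (this ▸ List.getElem_mem hlt)

theorem pvInfix_join (c : Char) (sub : List Char) (hc : c ∉ sub) :
    ∀ parts : List (List Char), parts ≠ [] →
      sub <:+: PySem.Chars.join [c] parts → ∃ p ∈ parts, sub <:+: p := by
  intro parts
  induction parts with
  | nil => intro h; exact absurd rfl h
  | cons a t ih =>
    intro _ h
    match t with
    | [] =>
      rw [PySem.Chars.join_singleton] at h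
      exact ⟨a, List.mem_cons_self, h⟩
    | b :: t' =>
      rw [PySem.Chars.join_cons_cons, List.append_assoc] at h
      rcases pvInfix_append_cons sub a (PySem.Chars.join [c] (b :: t')) c (by simpa using h) hc with h' | h'
      · exact ⟨a, List.mem_cons_self, h'⟩
      · obtain ⟨p, hp, hip⟩ := ih (by simp) h'
        exact ⟨p, List.mem_cons_of_mem a hp, hip⟩

theorem pvKey (s : List Char) :
    PySem.Chars.isIn "train".toList s
      = (pvF s []).any (fun p => PySem.Chars.isIn "train".toList p) := by
  have hdot : '.' ∉ "train".toList := by decide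
  have hjoin := pvJoin_pvF s []
  simp only [List.reverse_nil, List.nil_append] at hjoin
  by_cases h : PySem.Chars.isIn "train".toList s = true
  · rw [h]
    rw [PySem.Chars.isIn_iff_infix] at h
    obtain ⟨p, hp, hip⟩ := pvInfix_join '.' "train".toList hdot (pvF s []) (pvF_ne_nil s []) (by rw [hjoin]; exact h)
    symm
    rw [List.any_eq_true]
    exact ⟨p, hp, by rw [PySem.Chars.isIn_iff_infix]; exact hip⟩
  · rw [Bool.not_eq_true] at h
    rw [h]
    symm
    rw [List.any_eq_false]
    intro p hp
    rw [Bool.not_eq_true, PySem.Chars.isIn_eq_false_iff]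
    intro hinf
    rw [PySem.Chars.isIn_eq_false_iff] at h
    exact h (hinf.trans (by rw [← hjoin]; exact pvInfix_of_mem_join '.' (pvF s []) p hp))

-- A's core equals the split-based intermediate form
theorem pvAcore_eq_spec (s : List Char) : pvAcore s = pvSpecCore s := by
  unfold pvAcore pvSpecCore
  rw [pvSplitOn_eq]
  by_cases h : PySem.Chars.isIn "train".toList s = true
  · rw [h]
    obtain ⟨q, qs, hF⟩ : ∃ q qs, pvF s [] = q :: qs := by
      cases hq : pvF s [] with
      | nil => exact absurd hq (pvF_ne_nil s [])
      | cons q qs => exact ⟨q, qs, rfl⟩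
    have hany : (pvF s []).any (fun p => PySem.Chars.isIn "train".toList p) = true := by
      rw [← pvKey]; exact h
    rw [hF] at hany
    rw [hF]
    simp [PySem.List.slice_from_one]
    intro h1 h2
    rcases List.any_eq_true.mp hany with ⟨p, hp, hpt⟩
    rcases List.mem_cons.mp hp with rfl | hp'
    · simp [h1] at hpt
    · simp [h2 p hp'] at hpt
  · rw [Bool.not_eq_true] at h
    rw [h]
    have hany : (pvF s []).any (fun p => PySem.Chars.isIn "train".toList p) = false := by
      rw [← pvKey]; exact h
    simp only [Bool.not_false, if_true, PySem.List.slice_from_one]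
    have hany' : (pvF s []).tail.any (fun p => PySem.Chars.isIn "train".toList p) = false := by
      rw [List.any_eq_false] at hany ⊢
      exact fun p hp => hany p (List.mem_of_mem_tail hp)
    cases htail : (pvF s []).tail with
    | nil => simp [pvJoinInitials, PySem.Chars.join, List.intercalate]
    | cons q qs =>
      rw [htail] at hany'
      simp only [List.isEmpty_cons, Bool.not_false, if_true, hany', Bool.false_eq_true, if_false]

-- equations for pvJoinInitials
theorem pvJ_nil : pvJoinInitials [] = [] := by
  simp [pvJoinInitials, PySem.Chars.join, List.intercalate]

theorem pvJoin_nil_flatten (ps : List (List Char)) : PySem.Chars.join [] ps = ps.flatten := by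
  induction ps with
  | nil => simp [PySem.Chars.join, List.intercalate]
  | cons a t ih =>
    cases t with
    | nil => simp [PySem.Chars.join_singleton]
    | cons b t' =>
      rw [PySem.Chars.join_cons_cons]
      rw [ih]
      simp

theorem pvJ_cons_nil (ps : List (List Char)) : pvJoinInitials ([] :: ps) = pvJoinInitials ps := by
  simp [pvJoinInitials]

theorem pvJ_cons (c : Char) (p : List Char) (ps : List (List Char)) :
    pvJoinInitials ((c :: p) :: ps) = PySem.Chars.upper [c] ++ pvJoinInitials ps := by
  simp only [pvJoinInitials, pvJoin_nil_flatten, List.filter_cons, List.isEmpty_cons,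
    Bool.not_false, if_true, List.map_cons, List.flatten_cons]

-- the chars emitted by B's scan from state (part, pos), out stripped away
def pvScanOut (ht : Bool) : List Char → Nat → Nat → List Char
  | [], _, _ => []
  | c :: rest, part, pos =>
    if c = '.' then pvScanOut ht rest (part + 1) 0
    else
      (if (if ht then (decide (part = 0) && decide (pos < 2)) || (decide (0 < part) && decide (pos = 0))
           else decide (0 < part) && decide (pos = 0))
       then PySem.Chars.upper [c] else []) ++ pvScanOut ht rest part (pos + 1)

theorem pvFoldl_scan (ht : Bool) (s : List Char) :
    ∀ (out : List Char) (part pos : Nat),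
      (s.foldl (pvScanStep ht) (out, part, pos)).1 = out ++ pvScanOut ht s part pos := by
  induction s with
  | nil => intro out part pos; simp [pvScanOut]
  | cons c rest ih =>
    intro out part pos
    rw [List.foldl_cons]
    by_cases hc : c = '.'
    · rw [show pvScanStep ht (out, part, pos) c = (out, part + 1, 0) by simp [pvScanStep, hc]]
      rw [ih, pvScanOut, if_pos hc]
    · rw [pvScanOut, if_neg hc]
      by_cases ht' : (if ht then (decide (part = 0) && decide (pos < 2)) || (decide (0 < part) && decide (pos = 0))
          else decide (0 < part) && decide (pos = 0)) = true
      · rw [show pvScanStep ht (out, part, pos) c = (out ++ PySem.Chars.upper [c], part, pos + 1) by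
          simp only [pvScanStep, if_neg hc]; rw [if_pos ht']]
        rw [ih, if_pos ht', List.append_assoc]
      · rw [show pvScanStep ht (out, part, pos) c = (out, part, pos + 1) by
          simp only [pvScanStep, if_neg hc]; rw [if_neg ht']]
        rw [ih, if_neg ht', List.nil_append]

-- head/tail of pvF: tail is independent of cur, head prepends cur.reverse
theorem pvF_head_tail (s : List Char) : ∀ cur : List Char,
    (pvF s cur).headD [] = cur.reverse ++ (pvF s []).headD [] ∧
    (pvF s cur).tail = (pvF s []).tail := by
  induction s with
  | nil => intro cur; simp [pvF]
  | cons c rest ih =>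
    intro cur
    by_cases hc : c = '.'
    · simp [pvF, hc]
    · simp only [pvF, if_neg hc]
      constructor
      · rw [(ih (c :: cur)).1, (ih [c]).1]
        simp
      · rw [(ih (c :: cur)).2, (ih [c]).2]

theorem pvF_head_cons (c : Char) (rest : List Char) (hc : c ≠ '.') :
    (pvF (c :: rest) []).headD [] = c :: (pvF rest []).headD [] := by
  simp only [pvF, if_neg hc]
  rw [(pvF_head_tail rest [c]).1]
  simp

theorem pvF_tail_cons (c : Char) (rest : List Char) (hc : c ≠ '.') :
    (pvF (c :: rest) []).tail = (pvF rest []).tail := by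
  simp only [pvF, if_neg hc]
  exact (pvF_head_tail rest [c]).2

-- main characterization of the scan output
theorem pvScanOut_eq (ht : Bool) (s : List Char) : ∀ (part pos : Nat),
    pvScanOut ht s part pos =
      if part = 0 then
        (if ht then PySem.Chars.upper (((pvF s []).headD []).take (2 - pos)) else [])
          ++ pvJoinInitials ((pvF s []).tail)
      else if pos = 0 then pvJoinInitials (pvF s [])
      else pvJoinInitials ((pvF s []).tail) := by
  induction s with
  | nil =>
    intro part pos
    simp only [pvScanOut, pvF, List.reverse_nil, List.headD_cons, List.tail_cons]
    by_cases hp : part = 0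
    · rw [if_pos hp]; cases ht <;> simp [List.take_nil, PySem.Chars.upper, pvJ_nil]
    · rw [if_neg hp]
      by_cases hpos : pos = 0
      · rw [if_pos hpos, pvJ_cons_nil, pvJ_nil]
      · rw [if_neg hpos, pvJ_nil]
  | cons c rest ih =>
    intro part pos
    by_cases hc : c = '.'
    · subst hc
      rw [pvScanOut, if_pos rfl, ih (part + 1) 0]
      rw [if_neg (Nat.succ_ne_zero part), if_pos rfl]
      have hF : pvF ('.' :: rest) [] = [] :: pvF rest [] := by simp [pvF]
      rw [hF]
      simp only [List.headD_cons, List.tail_cons]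
      by_cases hp : part = 0
      · rw [if_pos hp]
        cases ht <;> simp [List.take_nil, PySem.Chars.upper, pvJ_cons_nil]
      · rw [if_neg hp]
        by_cases hpos : pos = 0
        · rw [if_pos hpos, pvJ_cons_nil]
        · rw [if_neg hpos]
    · rw [pvScanOut, if_neg hc, ih part (pos + 1)]
      have hhead := pvF_head_cons c rest hc
      have htail := pvF_tail_cons c rest hc
      obtain ⟨h', hH⟩ : ∃ h', (pvF (c :: rest) []).headD [] = c :: h' ∧ h' = (pvF rest []).headD [] :=
        ⟨(pvF rest []).headD [], hhead, rfl⟩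
      by_cases hp : part = 0
      · subst hp
        simp only [if_pos rfl, decide_true, Bool.true_and, decide_eq_true_eq,
          Nat.lt_irrefl, decide_false, Bool.false_and, Bool.or_false, htail]
        rcases hH with ⟨hH1, hH2⟩
        rw [hH1, hH2]
        cases ht with
        | false => simp
        | true =>
          simp only [if_pos rfl, decide_true, Bool.true_and]
          by_cases hlt : pos < 2
          · rw [if_pos (by simpa using hlt)]
            have : (2 - pos) = (2 - (pos + 1)) + 1 := by omega
            rw [this, List.take_succ_cons]
            simp [PySem.Chars.upper, List.append_assoc]
          · rw [if_neg (by simpa using hlt)]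
            have h1 : 2 - pos = 0 := by omega
            have h2 : 2 - (pos + 1) = 0 := by omega
            rw [h1, h2]
            simp
      · simp only [if_neg hp, htail]
        have hpne : decide (part = 0) = false := by simp [hp]
        have hppos : decide (0 < part) = true := by simp [Nat.pos_of_ne_zero hp]
        by_cases hpos : pos = 0
        · subst hpos
          simp only [hpne, hppos, decide_true, Bool.false_and, Bool.true_and, Bool.false_or,
            decide_eq_true_eq, if_pos rfl, Nat.succ_ne_zero, if_neg (Nat.one_ne_zero)]
          have hFcons : pvF (c :: rest) [] = ((pvF (c :: rest) []).headD []) :: (pvF (c :: rest) []).tail := by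
            cases hh : pvF (c :: rest) [] with
            | nil => exact absurd hh (pvF_ne_nil _ _)
            | cons a t => simp
          rw [hFcons, hH.1, pvJ_cons, htail]
          cases ht <;> simp
        · have hposne : decide (pos = 0) = false := by simp [hpos]
          simp only [hpne, hposne, Bool.false_and, Bool.and_false, Bool.or_false, if_neg hpos,
            Bool.false_eq_true, if_false]
          have : pos + 1 ≠ 0 := Nat.succ_ne_zero pos
          rw [if_neg this]
          cases ht <;> simp

-- B's scan equals the split-based intermediate form
theorem pvScan_eq_spec (s : List Char) :
    (s.foldl (pvScanStep (PySem.Chars.isIn "train".toList s)) ([], 0, 0)).1 = pvSpecCore s := by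
  rw [pvFoldl_scan, pvScanOut_eq, if_pos rfl]
  unfold pvSpecCore
  rw [pvSplitOn_eq]
  simp only [List.nil_append, Nat.sub_zero]
  by_cases h : PySem.Chars.isIn "train".toList s = true
  · rw [h]
    simp only [if_pos rfl]
    cases hF : pvF s [] with
    | nil => exact absurd hF (pvF_ne_nil s [])
    | cons q qs =>
      simp only [List.headD_cons, List.tail_cons]
      rw [PySem.List.slice_to q (by norm_num)]
      simp
  · rw [Bool.not_eq_true] at h
    rw [h]
    simp [PySem.List.slice_from_one]

-- ===== VERDICT (by name: the statement is the Claim_ definition above) =====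
theorem model_to_initials_spec : Claim_equal_model_to_initials := by
  intro model_name uses_covariates _
  unfold Spec_model_to_initials
  simp only [model_to_initials, model_to_initials_alt, pvScan_eq_spec, pvAcore_eq_spec]
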